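-- pv_equiv track=rewrite | github.com/Yang-Xavier/NLP_Lab | lab3/lab3.py | get_format_data
-- ===== SOURCE A (Python) =====
-- def get_format_data(train_data):
--     data = []
--     for s in train_data:
--         x = []
--         y = []
--         for term in s:
--             x.append(term[0])
--             y.append(term[1])
--         data.append((tuple(x),tuple(y)))
--     return tuple(data)
-- ===== SOURCE B (Python) =====
-- def get_format_data(train_data):
--     xs = [tuple(t[0] for t in s) for s in train_data]
--     ys = [tuple(t[1] for t in s) for s in train_data]
--     return tuple(zip(xs, ys))
-- ===== Notes on version B (the rewrite author's own statement) =====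
-- stated objective: alternative
-- what changed: Two staged passes over the whole dataset (one building all x-tuples, one building all y-tuples) zipped back together, instead of A's single pass with an interleaved double-append inner loop.
import Mathlib
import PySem

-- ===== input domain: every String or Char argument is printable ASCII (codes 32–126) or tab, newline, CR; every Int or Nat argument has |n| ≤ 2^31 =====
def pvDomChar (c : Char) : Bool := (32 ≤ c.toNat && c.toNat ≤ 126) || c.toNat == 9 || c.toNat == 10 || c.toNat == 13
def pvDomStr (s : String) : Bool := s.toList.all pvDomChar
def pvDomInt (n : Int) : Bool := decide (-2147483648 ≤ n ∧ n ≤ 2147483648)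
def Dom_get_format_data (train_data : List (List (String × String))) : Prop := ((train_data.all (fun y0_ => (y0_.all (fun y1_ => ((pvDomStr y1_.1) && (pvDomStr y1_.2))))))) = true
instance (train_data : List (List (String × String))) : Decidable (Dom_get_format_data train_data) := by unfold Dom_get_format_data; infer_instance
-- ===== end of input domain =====

-- ===== PORT A =====
-- B traverses the dataset in two staged passes (all x-tuples, then all y-tuples) and zips them, instead of A's interleaved inner loop.
def get_format_data (train_data : List (List (String × String))) : List (List String × List String) :=
  train_data.foldl (fun data s =>
    let xy := s.foldl (fun (xy : List String × List String) term =>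
      (xy.1 ++ [term.1], xy.2 ++ [term.2])) ([], [])
    data ++ [xy]) []

-- ===== PORT B =====
def get_format_data_alt (train_data : List (List (String × String))) : List (List String × List String) :=
  let xs := train_data.map (fun s => s.map Prod.fst)
  let ys := train_data.map (fun s => s.map Prod.snd)
  List.zip xs ys

-- ===== PRECONDITION & SPEC =====
def Spec_get_format_data (train_data : List (List (String × String))) (out : List (List String × List String)) : Prop := out = get_format_data_alt train_data
instance (train_data : List (List (String × String))) (out : List (List String × List String)) : Decidable (Spec_get_format_data train_data out) := by unfold Spec_get_format_data; infer_instance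

-- ===== CLAIM (what is proved, stated in full; the proofs are below) =====
def Claim_equal_get_format_data : Prop := ∀ (train_data : List (List (String × String))), Dom_get_format_data train_data → Spec_get_format_data train_data (get_format_data train_data)

-- ===== LEMMAS AND PROOFS =====

-- ===== VERDICT (by name: the statement is the Claim_ definition above) =====


theorem inner_eq (s : List (String × String)) (a b : List String) :
    s.foldl (fun (xy : List String × List String) term =>
      (xy.1 ++ [term.1], xy.2 ++ [term.2])) (a, b)
      = (a ++ s.map Prod.fst, b ++ s.map Prod.snd) := by
  induction s generalizing a b with
  | nil => simp
  | cons t ts ih => simp [List.foldl_cons, ih]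

theorem get_format_data_spec : Claim_equal_get_format_data := by
  intro td _
  unfold Spec_get_format_data get_format_data get_format_data_alt
  rw [PySem.List.foldl_append_singleton_eq_map, List.zip_map']
  refine List.map_congr_left (fun s _ => ?_)
  simp [inner_eq]
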